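-- pv_equiv track=rewrite | github.com/davidnvq/board_game | projet.py | cases_au_milieu_vide_diago
-- ===== SOURCE A (Python) =====
-- def cases_au_milieu_vide_diago(lig1, col1, lig2, col2, grille):
--     #### si pion 1 est au dessous (under) de pion 2:
--     if lig1 > lig2:
--         # cas 1: si pion 1 est diagonale a gauche de pion 2:
--         if col1 < col2:
--             somme = lig1 + col1
--             for lig in range(lig1 - 1, lig2, -1):
--                 col = somme - lig
--                 if grille[lig][col] != 0:
--                     return False
--             return True
--         # cas 2: si pion 1 est diagonale a droite de pion 2:
--         elif col1 > col2:
--             diff = lig1 - col1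
--             for lig in range(lig1 - 1, lig2, -1):
--                 col = lig - diff
--                 if grille[lig][col] != 0:
--                     return False
--             return True
--
--     ####si pion 1 est au dessus (above) de pion 2:
--     elif lig1 < lig2:
--         # si pion 1 est diagonale a gauche de pion 2:
--         if col1 < col2:
--             diff = lig1 - col1
--             for lig in range(lig1 + 1, lig2):
--                 col = lig - diff
--                 if grille[lig][col] != 0:
--                     return False
--             return True
--
--         # si pion 1 est diagonale a droite de pion 2:
--         elif col1 > col2:
--             somme = lig1 + col1
--             for lig in range(lig1 + 1, lig2):
--                 col = somme - lig
--                 if grille[lig][col] != 0: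
--                     return False
--             return True
--
--     else:
--         return False
-- ===== SOURCE B (Python) =====
-- def cases_au_milieu_vide_diago(lig1, col1, lig2, col2, grille):
--     """True iff every square strictly between the two diagonal squares is empty."""
--     if lig1 == lig2 or col1 == col2:
--         return False
--     dlig = 1 if lig1 < lig2 else -1
--     dcol = 1 if col1 < col2 else -1
--
--     def libre(lig, col):
--         if lig == lig2:
--             return True
--         return grille[lig][col] == 0 and libre(lig + dlig, col + dcol)
--
--     return libre(lig1 + dlig, col1 + dcol)
-- ===== Notes on version B (the rewrite author's own statement) =====
-- stated objective: alternative
-- what changed: B replaces A's four direction-specific loops with their somme/diff column formulas by a recursive helper: after computing the step direction once, libre(lig,col) checks the current cell and recurses one diagonal step until it reaches lig2; Pre_ excludes inputs with lig1 != lig2 and col1 == col2, on which A falls off its if/elif and returns None (not a bool), and inputs whose in-between cells leave the grid's index range, where A raises IndexError.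
-- outside the precondition, e.g. on cases_au_milieu_vide_diago(1, 0, 0, 0, [[0], [0]]): A returns None, B returns False; on cases_au_milieu_vide_diago(0, 0, 3, 3, [[0, 0], [0, 5]]): A returns False, B returns False
import Mathlib
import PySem

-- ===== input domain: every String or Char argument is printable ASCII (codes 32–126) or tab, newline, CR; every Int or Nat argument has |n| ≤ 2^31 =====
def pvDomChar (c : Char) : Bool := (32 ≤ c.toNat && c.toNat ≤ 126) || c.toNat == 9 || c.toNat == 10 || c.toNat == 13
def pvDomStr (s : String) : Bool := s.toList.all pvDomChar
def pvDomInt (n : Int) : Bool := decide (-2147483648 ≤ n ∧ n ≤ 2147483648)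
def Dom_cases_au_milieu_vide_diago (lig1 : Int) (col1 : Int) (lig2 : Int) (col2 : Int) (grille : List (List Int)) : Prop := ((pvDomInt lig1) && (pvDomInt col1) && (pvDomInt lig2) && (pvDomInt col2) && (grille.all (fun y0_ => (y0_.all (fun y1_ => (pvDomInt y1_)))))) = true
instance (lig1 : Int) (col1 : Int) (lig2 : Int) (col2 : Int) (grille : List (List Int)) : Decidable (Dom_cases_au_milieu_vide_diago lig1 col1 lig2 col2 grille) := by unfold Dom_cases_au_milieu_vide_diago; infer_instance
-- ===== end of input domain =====

-- B replaces A's four direction-specific loops (somme/diff column formulas) by a recursive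
-- helper that steps one diagonal cell at a time toward lig2; same cells, different decomposition.


-- ===== PORT A =====
-- A: four explicit direction branches; each walks the rows strictly between lig1 and lig2,
-- computing the column from a somme (lig1+col1) or diff (lig1-col1) formula.
-- grille[lig][col] is Python indexing (negative wrap); ported with pyGetD, total only under Pre_.
def pvCell (grille : List (List Int)) (lig col : Int) : Int :=
  PySem.List.pyGetD (PySem.List.pyGetD grille lig []) col 0

def cases_au_milieu_vide_diago (lig1 : Int) (col1 : Int) (lig2 : Int) (col2 : Int) (grille : List (List Int)) : Bool :=
  if lig1 > lig2 then
    if col1 < col2 then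
      (PySem.List.pyRange (lig1 - 1) lig2 (-1)).all (fun lig => pvCell grille lig (lig1 + col1 - lig) == 0)
    else if col1 > col2 then
      (PySem.List.pyRange (lig1 - 1) lig2 (-1)).all (fun lig => pvCell grille lig (lig - (lig1 - col1)) == 0)
    else false  -- Python falls through returning None here (excluded by Pre_)
  else if lig1 < lig2 then
    if col1 < col2 then
      (PySem.List.pyRange (lig1 + 1) lig2 1).all (fun lig => pvCell grille lig (lig - (lig1 - col1)) == 0)
    else if col1 > col2 then
      (PySem.List.pyRange (lig1 + 1) lig2 1).all (fun lig => pvCell grille lig (lig1 + col1 - lig) == 0)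
    else false  -- Python falls through returning None here (excluded by Pre_)
  else false

-- ===== PORT B =====
-- B's inner recursion libre(lig, col): Python stops when lig == lig2; here the recursion is
-- driven by a fuel equal to the number of remaining steps |lig2 - lig| (the step always moves
-- lig one unit toward lig2, so fuel = 0 exactly when lig == lig2).
def pvLibre (grille : List (List Int)) (dlig dcol : Int) : Nat → Int → Int → Bool
  | 0, _, _ => true
  | n + 1, lig, col => pvCell grille lig col == 0 && pvLibre grille dlig dcol n (lig + dlig) (col + dcol)

def cases_au_milieu_vide_diago_alt (lig1 : Int) (col1 : Int) (lig2 : Int) (col2 : Int) (grille : List (List Int)) : Bool :=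
  if lig1 == lig2 || col1 == col2 then false  -- Python B returns False here; the col1 == col2 part is excluded by Pre_
  else
    let dlig : Int := if lig1 < lig2 then 1 else -1
    let dcol : Int := if col1 < col2 then 1 else -1
    pvLibre grille dlig dcol ((lig2 - lig1).natAbs - 1) (lig1 + dlig) (col1 + dcol)

-- ===== PRECONDITION & SPEC =====
-- Pre_ excludes (a) inputs with lig1 != lig2 and col1 = col2, on which A falls through its
-- if/elif returning None (not a value of the declared Bool type), and (b) inputs where some
-- strictly-between diagonal cell lies outside the grid's Python wrap-range: on most of those A
-- raises IndexError, but A may instead return False when it meets a nonzero cell before the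
-- out-of-range one (B behaves identically there, it is excluded only because Pre_ cannot
-- inspect cell values).  Row-range is stated via the two endpoint rows (the traversed rows form
-- a contiguous interval, so this is equivalent and keeps the condition cheap to decide).
def Pre_cases_au_milieu_vide_diago (lig1 : Int) (col1 : Int) (lig2 : Int) (col2 : Int) (grille : List (List Int)) : Prop :=
  lig1 = lig2 ∨ (col1 ≠ col2 ∧
    ((lig2 - lig1).natAbs ≤ 1 ∨
      (PySem.Raise.InRange grille.length (lig1 + (if lig1 < lig2 then 1 else -1)) ∧
       PySem.Raise.InRange grille.length (lig2 - (if lig1 < lig2 then 1 else -1)) ∧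
       ∀ k ∈ List.range ((lig2 - lig1).natAbs - 1),
         PySem.Raise.InRange
           (PySem.List.pyGetD grille (lig1 + ((k : Int) + 1) * (if lig1 < lig2 then 1 else -1)) []).length
           (col1 + ((k : Int) + 1) * (if col1 < col2 then 1 else -1)))))
instance (lig1 : Int) (col1 : Int) (lig2 : Int) (col2 : Int) (grille : List (List Int)) : Decidable (Pre_cases_au_milieu_vide_diago lig1 col1 lig2 col2 grille) := by unfold Pre_cases_au_milieu_vide_diago; infer_instance

def pvWitness_cases_au_milieu_vide_diago : Int × Int × Int × Int × List (List Int) :=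
  (2, 1, 0, 3, [[0, 0, 0, 0], [0, 0, 0, 0], [0, 0, 0, 0]])

def Spec_cases_au_milieu_vide_diago (lig1 : Int) (col1 : Int) (lig2 : Int) (col2 : Int) (grille : List (List Int)) (out : Bool) : Prop := out = cases_au_milieu_vide_diago_alt lig1 col1 lig2 col2 grille
instance (lig1 : Int) (col1 : Int) (lig2 : Int) (col2 : Int) (grille : List (List Int)) (out : Bool) : Decidable (Spec_cases_au_milieu_vide_diago lig1 col1 lig2 col2 grille out) := by unfold Spec_cases_au_milieu_vide_diago; infer_instance

-- ===== CLAIM =====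
def Claim_equal_cases_au_milieu_vide_diago : Prop := ∀ (lig1 : Int) (col1 : Int) (lig2 : Int) (col2 : Int) (grille : List (List Int)), Dom_cases_au_milieu_vide_diago lig1 col1 lig2 col2 grille → Pre_cases_au_milieu_vide_diago lig1 col1 lig2 col2 grille → Spec_cases_au_milieu_vide_diago lig1 col1 lig2 col2 grille (cases_au_milieu_vide_diago lig1 col1 lig2 col2 grille)

-- ===== LEMMAS AND PROOFS =====
-- B's recursion unfolded into the list of the cells it visits.
theorem pvLibre_eq (g : List (List Int)) (dl dc : Int) :
    ∀ (n : Nat) (l c : Int),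
      pvLibre g dl dc n l c
        = (List.range n).all (fun k => pvCell g (l + (k : Int) * dl) (c + (k : Int) * dc) == 0)
  | 0, l, c => by simp [pvLibre]
  | n + 1, l, c => by
      rw [List.range_succ_eq_map]
      simp only [List.all_cons, List.all_map, pvLibre]
      rw [pvLibre_eq g dl dc n (l + dl) (c + dc)]
      congr 1
      · norm_num
      · refine congrArg _ (funext fun k => ?_)
        simp only [Function.comp]
        rw [show l + dl + (k : Int) * dl = l + ((k : Nat) + 1 : Int) * dl from by ring,
            show c + dc + (k : Int) * dc = c + ((k : Nat) + 1 : Int) * dc from by ring]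
        push_cast
        ring_nf

-- ===== VERDICT =====
theorem cases_au_milieu_vide_diago_spec : Claim_equal_cases_au_milieu_vide_diago := by
  intro lig1 col1 lig2 col2 grille _ hpre
  unfold Spec_cases_au_milieu_vide_diago
  unfold cases_au_milieu_vide_diago cases_au_milieu_vide_diago_alt
  by_cases heq : lig1 = lig2
  · subst heq; simp
  rcases hpre with h | ⟨hc, _⟩
  · exact absurd h heq
  rw [if_neg (by simp [heq, hc] : ¬ ((lig1 == lig2 || col1 == col2) = true))]
  rcases lt_or_gt_of_ne heq with hl | hl
  · -- lig1 < lig2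
    rw [if_neg (by omega : ¬ lig1 > lig2), if_pos hl]
    simp only [if_pos hl]
    rcases lt_or_gt_of_ne hc with hcc | hcc
    · -- col1 < col2
      rw [if_pos hcc]
      simp only [if_pos hcc]
      rw [pvLibre_eq, PySem.List.pyRange_one, List.all_map]
      have hn : (lig2 - (lig1 + 1)).toNat = (lig2 - lig1).natAbs - 1 := by omega
      rw [hn]
      refine congrArg _ (funext fun k => ?_)
      simp only [Function.comp]
      rw [show (lig1 + 1) + (k : Int) = lig1 + 1 + (k : Int) * 1 from by ring,
          show lig1 + 1 + (k : Int) * 1 - (lig1 - col1) = col1 + 1 + (k : Int) * 1 from by ring]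
    · -- col2 < col1
      rw [if_neg (by omega : ¬ col1 < col2), if_pos hcc]
      simp only [if_neg (by omega : ¬ col1 < col2)]
      rw [pvLibre_eq, PySem.List.pyRange_one, List.all_map]
      have hn : (lig2 - (lig1 + 1)).toNat = (lig2 - lig1).natAbs - 1 := by omega
      rw [hn]
      refine congrArg _ (funext fun k => ?_)
      simp only [Function.comp]
      rw [show (lig1 + 1) + (k : Int) = lig1 + 1 + (k : Int) * 1 from by ring,
          show lig1 + col1 - (lig1 + 1 + (k : Int) * 1) = col1 + -1 + (k : Int) * -1 from by ring]
  · -- lig2 < lig1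
    rw [if_pos hl]
    simp only [if_neg (by omega : ¬ lig1 < lig2)]
    rcases lt_or_gt_of_ne hc with hcc | hcc
    · -- col1 < col2
      rw [if_pos hcc]
      simp only [if_pos hcc]
      rw [pvLibre_eq, PySem.List.pyRange_neg_one, List.all_map]
      have hn : ((lig1 - 1) - lig2).toNat = (lig2 - lig1).natAbs - 1 := by omega
      rw [hn]
      refine congrArg _ (funext fun k => ?_)
      simp only [Function.comp]
      rw [show (lig1 - 1 : Int) - (k : Int) = lig1 + -1 + (k : Int) * -1 from by ring,
          show lig1 + col1 - (lig1 + -1 + (k : Int) * -1) = col1 + 1 + (k : Int) * 1 from by ring]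
    · -- col2 < col1
      rw [if_neg (by omega : ¬ col1 < col2), if_pos hcc]
      simp only [if_neg (by omega : ¬ col1 < col2)]
      rw [pvLibre_eq, PySem.List.pyRange_neg_one, List.all_map]
      have hn : ((lig1 - 1) - lig2).toNat = (lig2 - lig1).natAbs - 1 := by omega
      rw [hn]
      refine congrArg _ (funext fun k => ?_)
      simp only [Function.comp]
      rw [show (lig1 - 1 : Int) - (k : Int) = lig1 + -1 + (k : Int) * -1 from by ring,
          show lig1 + -1 + (k : Int) * -1 - (lig1 - col1) = col1 + -1 + (k : Int) * -1 from by ring]
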